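-- pv_equiv track=rewrite | github.com/yassineAllali/Hidden_Massage | hidden_message.py | decrypt_embedded_text
-- ===== SOURCE A (Python) =====
-- def get_part_of_binary(binary, part_number):
--     if part_number < 4:
--         return binary[(part_number * 2):((part_number * 2) + 2)]
--
-- def convert_to_binary_8_bits(number):
--     return bin(number)[2:].zfill(8)
--
-- def binary_to_int(binary):
--     return int(binary, 2)
--
-- def chunk_string_to_8_bits(binary_text):
--     return [binary_text[i:i + 8] for i in range(0, len(binary_text), 8)]
--
-- def decrypt_embedded_text(encrypted_img):
--     decrypted = ''
--     for i in range(len(encrypted_img)):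
--         for j in range(len(encrypted_img[i])):
--             for element in encrypted_img[i][j]:
--                 binary_element = convert_to_binary_8_bits(element)
--                 decrypted += get_part_of_binary(binary_element, 3)
--
--     decrypted = chunk_string_to_8_bits(decrypted)
--     decrypted_text = ''
--     for char in decrypted:
--         ascii_char = binary_to_int(char)
--         decrypted_text += chr(ascii_char)
--
--     return decrypted_text.split('<<end>>')[0]
-- ===== SOURCE B (Python) =====
-- def decrypt_embedded_text(encrypted_img):
--     text = ''
--     buffer = ''
--     for row in encrypted_img:
--         for pixel in row:
--             for element in pixel:
--                 buffer += bin(element)[2:].zfill(8)[6:8]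
--                 # each element adds exactly 2 bits, so one flush is enough
--                 if len(buffer) >= 8:
--                     text += chr(int(buffer[:8], 2))
--                     buffer = buffer[8:]
--     if buffer:
--         text += chr(int(buffer, 2))
--     return text.split('<<end>>')[0]
-- ===== Notes on version B (the rewrite author's own statement) =====
-- stated objective: alternative
-- what changed: B streams: it keeps a running bit buffer and emits each character as soon as 8 bits are available (flushing any short leftover chunk at the end), instead of A's two-phase build-one-big-bit-string / chunk-into-8s / second conversion loop; B also drops A's four helper functions and the index-based loops.
import Mathlib
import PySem

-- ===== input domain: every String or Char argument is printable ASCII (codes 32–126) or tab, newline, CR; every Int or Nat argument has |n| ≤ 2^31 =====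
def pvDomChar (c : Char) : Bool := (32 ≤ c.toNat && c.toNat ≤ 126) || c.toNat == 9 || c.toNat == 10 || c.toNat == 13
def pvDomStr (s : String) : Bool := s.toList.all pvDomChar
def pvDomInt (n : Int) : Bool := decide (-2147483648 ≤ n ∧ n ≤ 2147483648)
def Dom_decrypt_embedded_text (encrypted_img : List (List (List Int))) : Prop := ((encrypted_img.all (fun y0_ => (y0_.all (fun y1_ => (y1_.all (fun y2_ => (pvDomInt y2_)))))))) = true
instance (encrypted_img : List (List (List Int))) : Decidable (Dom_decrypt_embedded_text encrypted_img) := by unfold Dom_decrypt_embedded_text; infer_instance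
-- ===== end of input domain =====

-- B streams the hidden bits through a running buffer (emitting each character as soon as
-- 8 bits are available, flushing the short leftover chunk at the end) instead of A's
-- two-phase build-whole-bit-string / chunk-into-8s / second conversion loop.


-- ===== PORT A =====
-- Ported on List Char (PySem.Chars primitives are exact there); result wrapped as String.
def get_part_of_binary (binary : List Char) (part_number : Int) : List Char :=
  if part_number < 4 then
    PySem.List.slice binary (some (part_number * 2)) (some (part_number * 2 + 2))
  else []  -- Python returns None here; A only ever calls this with part_number = 3

def convert_to_binary_8_bits (number : Int) : List Char :=
  PySem.Chars.zfill (PySem.List.slice (PySem.Int.toBinChars0b number) (some 2) none) 8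

-- int(binary, 2); none = ValueError (only reachable via element -1, excluded by Pre_)
def binary_to_int (binary : List Char) : Int :=
  (PySem.Int.ofCharsBase? binary 2).getD 0

def chunk_string_to_8_bits (binary_text : List Char) : List (List Char) :=
  (PySem.List.pyRange 0 (binary_text.length : Int) 8).map
    (fun i => PySem.List.slice binary_text (some i) (some (i + 8)))

def decrypt_embedded_text (encrypted_img : List (List (List Int))) : String :=
  let decrypted : List Char :=
    (PySem.List.pyRange 0 (encrypted_img.length : Int) 1).foldl (fun acc i =>
      let row := PySem.List.pyGetD encrypted_img i []
      (PySem.List.pyRange 0 (row.length : Int) 1).foldl (fun acc j =>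
        let pixel := PySem.List.pyGetD row j []
        pixel.foldl (fun acc element =>
          acc ++ get_part_of_binary (convert_to_binary_8_bits element) 3) acc) acc) []
  let chunks := chunk_string_to_8_bits decrypted
  -- chr(v); Char.ofNat is exact for the 0 ≤ v < 256 values int(chunk, 2) yields here
  let decrypted_text : List Char :=
    chunks.foldl (fun t ch => t ++ [Char.ofNat (binary_to_int ch).toNat]) []
  String.ofList (PySem.List.pyGetD (PySem.Chars.splitOn decrypted_text "<<end>>".toList) 0 [])

-- ===== PORT B =====
-- bin(element)[2:].zfill(8)[6:8]
def pvTwoBits (element : Int) : List Char :=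
  PySem.List.slice
    (PySem.Chars.zfill (PySem.List.slice (PySem.Int.toBinChars0b element) (some 2) none) 8)
    (some 6) (some 8)

-- state = (text, buffer); one streaming step per element (each element adds exactly 2
-- bits, so a single flush is enough, as the comment in Source B notes)
def pvStep (st : List Char × List Char) (element : Int) : List Char × List Char :=
  let buffer := st.2 ++ pvTwoBits element
  if 8 ≤ buffer.length then
    (st.1 ++ [Char.ofNat ((PySem.Int.ofCharsBase? (PySem.List.slice buffer none (some 8)) 2).getD 0).toNat],
     PySem.List.slice buffer (some 8) none)
  else (st.1, buffer)

def decrypt_embedded_text_alt (encrypted_img : List (List (List Int))) : String :=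
  let st :=
    encrypted_img.foldl (fun st row =>
      row.foldl (fun st pixel => pixel.foldl pvStep st) st)
      (([] : List Char), ([] : List Char))
  let text :=
    if st.2 ≠ [] then
      st.1 ++ [Char.ofNat ((PySem.Int.ofCharsBase? st.2 2).getD 0).toNat]
    else st.1
  String.ofList (PySem.List.pyGetD (PySem.Chars.splitOn text "<<end>>".toList) 0 [])

-- ===== PRECONDITION & SPEC =====
-- Pre_ excludes images containing the element -1: its bin()[2:] slice injects the letter
-- 'b' into the bit string, so BOTH A and B raise ValueError in int(..., 2) there.
def Pre_decrypt_embedded_text (encrypted_img : List (List (List Int))) : Prop :=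
  ∀ row ∈ encrypted_img, ∀ pixel ∈ row, ∀ e ∈ pixel, e ≠ -1
instance (encrypted_img : List (List (List Int))) : Decidable (Pre_decrypt_embedded_text encrypted_img) := by unfold Pre_decrypt_embedded_text; infer_instance

def pvWitness_decrypt_embedded_text : List (List (List Int)) := [[[72, 101], [108, 108]]]

def Spec_decrypt_embedded_text (encrypted_img : List (List (List Int))) (out : String) : Prop := out = decrypt_embedded_text_alt encrypted_img
instance (encrypted_img : List (List (List Int))) (out : String) : Decidable (Spec_decrypt_embedded_text encrypted_img out) := by unfold Spec_decrypt_embedded_text; infer_instance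

-- ===== CLAIM (what is proved, stated in full; the proofs are below) =====
def Claim_equal_decrypt_embedded_text : Prop := ∀ (encrypted_img : List (List (List Int))), Dom_decrypt_embedded_text encrypted_img → Pre_decrypt_embedded_text encrypted_img → Spec_decrypt_embedded_text encrypted_img (decrypt_embedded_text encrypted_img)

-- ===== LEMMAS AND PROOFS =====

-- chr(int(chunk, 2)) as one function, for stating the chunk/stream agreement
def pvConv (cs : List Char) : Char :=
  Char.ofNat ((PySem.Int.ofCharsBase? cs 2).getD 0).toNat

-- structural 8-chunking, the common reference point of both ports
def pvChunks (l : List Char) : List (List Char) :=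
  if l = [] then [] else l.take 8 :: pvChunks (l.drop 8)
termination_by l.length
decreasing_by
  rename_i h
  simp only [List.length_drop]
  have := List.length_pos_iff.mpr h
  omega

theorem pvTwoBits_eq (e : Int) :
    get_part_of_binary (convert_to_binary_8_bits e) 3 = pvTwoBits e := by
  norm_num [get_part_of_binary, convert_to_binary_8_bits, pvTwoBits]

theorem length_pvTwoBits (e : Int) : (pvTwoBits e).length = 2 := by
  unfold pvTwoBits
  rw [PySem.List.length_slice]
  have h8 : 8 ≤ (PySem.Chars.zfill (PySem.List.slice (PySem.Int.toBinChars0b e) (some 2) none) 8).length := by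
    rw [PySem.Chars.length_zfill]; omega
  simp [PySem.List.clampIdx]
  omega

-- A's comprehension-over-range chunking is the structural chunking
theorem slice_shift (cs : List Char) (k : Nat) :
    PySem.List.slice cs (some (0 + 8 * ((k : Int) + 1))) (some (0 + 8 * ((k : Int) + 1) + 8))
      = PySem.List.slice (cs.drop 8) (some (0 + 8 * (k : Int))) (some (0 + 8 * (k : Int) + 8)) := by
  rw [PySem.List.slice_toNat cs (by positivity) (by positivity),
      PySem.List.slice_toNat (cs.drop 8) (by positivity) (by positivity), List.drop_drop]
  have e1 : (0 + 8 * ((k : Int) + 1) + 8).toNat - (0 + 8 * ((k : Int) + 1)).toNat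
      = (0 + 8 * (k : Int) + 8).toNat - (0 + 8 * (k : Int)).toNat := by omega
  have e2 : (0 + 8 * ((k : Int) + 1)).toNat = (0 + 8 * (k : Int)).toNat + 8 := by omega
  rw [e1, e2, Nat.add_comm]

theorem chunk_aux (n : Nat) : ∀ cs : List Char, cs.length = n → chunk_string_to_8_bits cs = pvChunks cs := by
  induction n using Nat.strong_induction_on with
  | _ n ih =>
    intro cs hn
    unfold chunk_string_to_8_bits
    rw [pvChunks]
    rcases eq_or_ne cs [] with rfl | hne
    · simp [PySem.List.pyRange_of_pos]
    · have hpos : 0 < cs.length := List.length_pos_iff.mpr hne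
      rw [PySem.List.pyRange_of_pos _ _ (by norm_num)]
      rw [if_pos (by exact_mod_cast hpos), if_neg hne]
      have hcount : (((cs.length : Int) - 0 + 8 - 1) / 8).toNat = (cs.length - 1) / 8 + 1 := by
        omega
      rw [hcount, List.range_succ_eq_map]
      simp only [List.map_cons, List.map_map]
      refine List.cons_eq_cons.mpr ⟨?_, ?_⟩
      · rw [PySem.List.slice_toNat cs (by norm_num) (by norm_num)]
        norm_num
        simp
      · have hrec := ih (cs.drop 8).length (by simp; omega) (cs.drop 8) rfl
        rw [← hrec]
        unfold chunk_string_to_8_bits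
        rw [PySem.List.pyRange_of_pos _ _ (by norm_num)]
        by_cases h8 : cs.length ≤ 8
        · have : cs.drop 8 = [] := List.drop_eq_nil_of_le h8
          rw [this]
          simp only [List.length_nil]
          rw [if_neg (by norm_num)]
          have : (cs.length - 1) / 8 = 0 := by omega
          simp [this]
        · rw [if_pos (by simp; omega)]
          have hc2 : ((((cs.drop 8).length : Int) - 0 + 8 - 1) / 8).toNat = (cs.length - 1) / 8 := by
            simp only [List.length_drop]
            omega
          rw [hc2, List.map_map]
          refine List.map_congr_left ?_
          intro k _
          simp only [Function.comp_apply]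
          have := slice_shift cs k
          push_cast
          push_cast at this
          exact this

theorem chunk_eq (cs : List Char) : chunk_string_to_8_bits cs = pvChunks cs :=
  chunk_aux cs.length cs rfl

-- streaming with flush-at-8 and a final leftover flush IS chunk-then-convert
theorem stream_eq (es : List Int) : ∀ (t b : List Char), b.length < 8 →
    (let st := es.foldl pvStep (t, b)
     if st.2 ≠ [] then st.1 ++ [pvConv st.2] else st.1)
    = t ++ (pvChunks (b ++ es.flatMap pvTwoBits)).map pvConv := by
  induction es with
  | nil =>
    intro t b hb
    simp only [List.foldl_nil, List.flatMap_nil, List.append_nil]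
    rcases eq_or_ne b [] with rfl | hne
    · rw [pvChunks]; simp
    · rw [pvChunks, if_neg hne, List.take_of_length_le (by omega),
        List.drop_eq_nil_of_le (by omega), pvChunks]
      simp [hne]
  | cons e es ih =>
    intro t b hb
    have hlen : (b ++ pvTwoBits e).length = b.length + 2 := by
      simp [length_pvTwoBits]
    rw [List.foldl_cons, List.flatMap_cons, ← List.append_assoc]
    by_cases h8 : 8 ≤ b.length + 2
    · have hstate : pvStep (t, b) e
          = (t ++ [pvConv ((b ++ pvTwoBits e).take 8)], (b ++ pvTwoBits e).drop 8) := by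
        simp only [pvStep]
        rw [if_pos (by rw [hlen]; omega)]
        rw [PySem.List.slice_to _ (by norm_num), PySem.List.slice_from _ (by norm_num)]
        simp [pvConv]
      rw [hstate, ih _ _ (by rw [List.length_drop, hlen]; omega)]
      have hne : b ++ pvTwoBits e ++ es.flatMap pvTwoBits ≠ [] := by
        intro hcontra
        have h2 := length_pvTwoBits e
        have := congrArg List.length hcontra
        simp at this
        rw [this.2.1] at h2
        simp at h2
      have hle : 8 ≤ (b ++ pvTwoBits e).length := by omega
      conv_rhs => rw [pvChunks]
      rw [if_neg hne, List.take_append_of_le_length (l₂ := es.flatMap pvTwoBits) hle,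
          List.drop_append_of_le_length (l₂ := es.flatMap pvTwoBits) hle]
      simp [List.append_assoc]
    · have hstate : pvStep (t, b) e = (t, b ++ pvTwoBits e) := by
        simp only [pvStep]
        rw [if_neg (by rw [hlen]; omega)]
      rw [hstate, ih _ _ (by rw [hlen]; omega)]

theorem ports_eq (img : List (List (List Int))) :
    decrypt_embedded_text img = decrypt_embedded_text_alt img := by
  unfold decrypt_embedded_text decrypt_embedded_text_alt
  dsimp only
  -- A's index loops are folds over the rows / pixels themselves
  simp only [PySem.List.foldl_pyRange_zero_pyGetD']
  -- A's bit extraction is B's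
  simp only [pvTwoBits_eq]
  -- both triple loops are folds over the flattened element list
  rw [← List.foldl_flatten, ← List.foldl_flatten, ← List.foldl_flatten, ← List.foldl_flatten]
  rw [PySem.List.foldl_append_eq_flatMap pvTwoBits img.flatten.flatten [], List.nil_append]
  rw [chunk_eq,
      PySem.List.foldl_append_singleton_eq_map (fun ch => Char.ofNat (binary_to_int ch).toNat)
        (pvChunks (img.flatten.flatten.flatMap pvTwoBits)) [],
      List.nil_append]
  have hB := stream_eq (img.flatten.flatten) [] [] (by simp)
  simp only [pvConv] at hB
  rw [hB]
  unfold pvConv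
  simp [binary_to_int]

-- ===== VERDICT (by name: the statement is the Claim_ definition above) =====
theorem decrypt_embedded_text_spec : Claim_equal_decrypt_embedded_text := by
  intro encrypted_img _ _
  unfold Spec_decrypt_embedded_text
  exact ports_eq encrypted_img
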